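-- pv_equiv track=rewrite | github.com/matina13/anlysh-eikonas- | analysheikonas.py | compute_cartesian_product
-- ===== SOURCE A (Python) =====
-- def compute_cartesian_product(E):
--     C = {}
--     for ei, vertices in E.items():
--         for vi in vertices:
--             for vj in vertices:
--                 if vi != vj:
--                     C[(vi, vj)] = C.get((vi, vj), 0) + 1
--     return C
-- ===== SOURCE B (Python) =====
-- def _edge_updates(vertices):
--     freq = {}
--     for v in vertices:
--         freq[v] = freq.get(v, 0) + 1
--     return [((x, y), cx * cy)
--             for x, cx in freq.items()
--             for y, cy in freq.items()
--             if x != y]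
--
--
-- def compute_cartesian_product(E):
--     C = {}
--     for key, m in (u for vs in E.values() for u in _edge_updates(vs)):
--         C[key] = C.get(key, 0) + m
--     return C
-- ===== Notes on version B (the rewrite author's own statement) =====
-- stated objective: alternative
-- what changed: B is a staged pipeline: a helper turns each edge into a flat list of ((x,y), freq[x]*freq[y]) contributions over distinct-value pairs of the edge's frequency map, and a single separate aggregation loop folds all contributions of all edges into the dict, replacing A's positional triple loop that increments the shared dict in place once per position pair.
import Mathlib
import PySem

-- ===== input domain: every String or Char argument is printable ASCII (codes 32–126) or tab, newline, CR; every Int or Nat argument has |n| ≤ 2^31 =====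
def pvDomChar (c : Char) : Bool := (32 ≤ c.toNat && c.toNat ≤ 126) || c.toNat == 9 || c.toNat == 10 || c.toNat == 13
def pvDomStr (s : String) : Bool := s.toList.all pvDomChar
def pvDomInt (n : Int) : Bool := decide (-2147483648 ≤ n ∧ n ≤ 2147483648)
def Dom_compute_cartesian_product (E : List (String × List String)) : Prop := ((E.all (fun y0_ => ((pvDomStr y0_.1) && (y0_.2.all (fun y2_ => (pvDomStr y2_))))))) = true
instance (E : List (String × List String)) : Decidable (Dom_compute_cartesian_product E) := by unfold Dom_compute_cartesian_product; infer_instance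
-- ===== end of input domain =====

-- B is a staged pipeline (helper: each edge → flat list of ((x,y), freq[x]*freq[y]) contributions
-- over distinct-value pairs; then one aggregation fold) instead of A's in-place positional triple
-- loop on the shared dict (objective: alternative).

-- ===== PORT A =====
def compute_cartesian_product (E : List (String × List String)) : List (String × String × Int) :=
  let C : PySem.Dict (String × String) Int :=
    E.foldl (fun C p =>
      p.2.foldl (fun C vi =>
        p.2.foldl (fun C vj =>
          if vi ≠ vj then C.insert (vi, vj) (C.getD (vi, vj) 0 + 1) else C) C) C)
      PySem.Dict.empty
  C.items.map (fun q => (q.1.1, q.1.2, q.2))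

-- ===== PORT B =====
-- helper _edge_updates: frequency map of one edge, then the comprehension over ordered
-- distinct-value pairs (filter+map transliterates 'for y, cy in freq.items() if x != y')
def pvEdgeUpdates (vertices : List String) : List ((String × String) × Int) :=
  let freq : PySem.Dict String Int :=
    vertices.foldl (fun f v => f.insert v (f.getD v 0 + 1)) PySem.Dict.empty
  freq.items.flatMap (fun xp =>
    (freq.items.filter (fun yp => xp.1 != yp.1)).map
      (fun yp => ((xp.1, yp.1), xp.2 * yp.2)))

def compute_cartesian_product_alt (E : List (String × List String)) : List (String × String × Int) :=
  let updates : List ((String × String) × Int) := E.flatMap (fun vs => pvEdgeUpdates vs.2)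
  let C : PySem.Dict (String × String) Int :=
    updates.foldl (fun C u => C.insert u.1 (C.getD u.1 0 + u.2)) PySem.Dict.empty
  C.items.map (fun q => (q.1.1, q.1.2, q.2))

-- ===== PRECONDITION & SPEC =====
def Spec_compute_cartesian_product (E : List (String × List String)) (out : List (String × String × Int)) : Prop := out = compute_cartesian_product_alt E
instance (E : List (String × List String)) (out : List (String × String × Int)) : Decidable (Spec_compute_cartesian_product E out) := by unfold Spec_compute_cartesian_product; infer_instance

-- ===== CLAIM (what is proved, stated in full; the proofs are below) =====
def Claim_equal_compute_cartesian_product : Prop := ∀ (E : List (String × List String)), Dom_compute_cartesian_product E → Spec_compute_cartesian_product E (compute_cartesian_product E)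

-- ===== LEMMAS AND PROOFS =====

-- the common shape of both aggregation loops: a fold of "C[k] = C.get(k,0) + m" updates
def pvRun (C : PySem.Dict (String × String) Int) (L : List ((String × String) × Int)) :
    PySem.Dict (String × String) Int :=
  L.foldl (fun C p => C.insert p.1 (C.getD p.1 0 + p.2)) C

-- total amount added to key k by the update list L
def pvKsum (k : String × String) (L : List ((String × String) × Int)) : Int :=
  ((L.filter (fun p => p.1 == k)).map Prod.snd).sum

-- the ordered pairs (a, b) with a drawn from u, b from w, b ≠ a, in row-major order
def pvP (u w : List String) : List (String × String) :=
  u.flatMap (fun a => (w.filter (fun b => b != a)).map (fun b => (a, b)))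

-- the update list produced by A's triple loop on one edge
def pvAL (v : List String) : List ((String × String) × Int) :=
  (pvP v v).map (fun k => (k, (1 : Int)))

-- the update list produced by B's helper on one edge, in normalised terms
def pvBL (v : List String) : List ((String × String) × Int) :=
  (pvP (PySem.Set.ofList v) (PySem.Set.ofList v)).map
    (fun k => (k, (v.count k.1 : Int) * (v.count k.2 : Int)))

-- normal form of an update list: first-occurrence keys, each with its total amount
def pvNormal (L : List ((String × String) × Int)) : List ((String × String) × Int) :=
  (PySem.Set.ofList (L.map Prod.fst)).map (fun k => (k, pvKsum k L))

theorem pv_foldl_ite_filter {α β : Type} (p : β → Prop) [DecidablePred p] (f : α → β → α) :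
    ∀ (l : List β) (C : α),
      l.foldl (fun C y => if p y then f C y else C) C = (l.filter (fun y => decide (p y))).foldl f C := by
  intro l
  induction l with
  | nil => intro C; rfl
  | cons a t ih =>
    intro C
    by_cases h : p a <;> simp [h, ih]

theorem pvRun_append (C : PySem.Dict (String × String) Int) (L₁ L₂ : List ((String × String) × Int)) :
    pvRun C (L₁ ++ L₂) = pvRun (pvRun C L₁) L₂ := by
  simp [pvRun, List.foldl_append]

theorem pvRun_flatMap {β : Type} (g : β → List ((String × String) × Int)) :
    ∀ (v : List β) (C : PySem.Dict (String × String) Int),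
      v.foldl (fun C a => pvRun C (g a)) C = pvRun C (v.flatMap g) := by
  intro v
  induction v with
  | nil => intro C; rfl
  | cons a t ih => intro C; simp [List.flatMap_cons, pvRun_append, ih]

theorem pvRun_nodup (L : List ((String × String) × Int)) (C : PySem.Dict (String × String) Int)
    (h : C.keys.Nodup) : (pvRun C L).keys.Nodup := by
  exact PySem.Dict.nodup_keys_foldl_insert_key L Prod.fst (fun d p => d.getD p.1 0 + p.2) C h

theorem pv_stepA_eq_run (v : List String) (C : PySem.Dict (String × String) Int) :
    v.foldl (fun C vi =>
      v.foldl (fun C vj =>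
        if vi ≠ vj then C.insert (vi, vj) (C.getD (vi, vj) 0 + 1) else C) C) C
    = pvRun C (pvAL v) := by
  have hrow : ∀ (vi : String) (C : PySem.Dict (String × String) Int),
      v.foldl (fun C vj =>
        if vi ≠ vj then C.insert (vi, vj) (C.getD (vi, vj) 0 + 1) else C) C
      = pvRun C ((v.filter (fun b => b != vi)).map (fun b => ((vi, b), (1 : Int)))) := by
    intro vi C
    have h1 := pv_foldl_ite_filter (fun vj => vi ≠ vj)
      (fun C vj => C.insert (vi, vj) (C.getD (vi, vj) 0 + 1)) v C
    rw [h1]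
    have hpred : (fun y => decide (vi ≠ y)) = (fun b => b != vi) := by
      funext y; by_cases h : vi = y <;> simp [h, bne_iff_ne] <;> exact fun hy => h hy.symm
    rw [hpred, pvRun, List.foldl_map]
  calc v.foldl (fun C vi =>
      v.foldl (fun C vj =>
        if vi ≠ vj then C.insert (vi, vj) (C.getD (vi, vj) 0 + 1) else C) C) C
      = v.foldl (fun C vi => pvRun C ((v.filter (fun b => b != vi)).map (fun b => ((vi, b), (1 : Int))))) C := by
        apply PySem.List.foldl_congr_mem
        intro C vi _; exact hrow vi C
    _ = pvRun C (pvAL v) := by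
        rw [pvRun_flatMap]
        unfold pvAL pvP
        rw [List.map_flatMap]
        simp [List.map_map, Function.comp_def]


theorem pv_insert_self_of_contains (C : PySem.Dict (String × String) Int) (k : String × String)
    (hc : C.contains k = true) (hnd : C.keys.Nodup) :
    C.insert k (C.getD k 0) = C := by
  apply PySem.Dict.ext
  rw [PySem.Dict.items_insert, if_pos hc]
  have : ∀ p ∈ C.items, (if (p.1 == k) = true then (k, C.getD k 0) else p) = p := by
    intro p hp
    by_cases h : p.1 = k
    · have hp' : (k, p.2) ∈ C.items := by
        have : p = (k, p.2) := by cases p; simp_all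
        rwa [← this]
      have := PySem.Dict.getD_of_mem_items C hp' hnd 0
      simp [h, this]
      cases p; simp_all
    · simp [h]
  rw [List.map_congr_left this]; simp

theorem pv_insert_comm_of_contains (C : PySem.Dict (String × String) Int)
    (k k' : String × String) (u w : Int) (hc : C.contains k = true) (hne : k' ≠ k) :
    (C.insert k' w).insert k u = (C.insert k u).insert k' w := by
  have hck' : ∀ (z : Int), (C.insert k' z).contains k = true := by
    intro z; rw [PySem.Dict.contains_insert]; simp [hc]
  have hck : (C.insert k u).contains k' = C.contains k' := by
    rw [PySem.Dict.contains_insert]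
    simp [beq_iff_eq, hne]
  apply PySem.Dict.ext
  by_cases h' : C.contains k' = true
  · rw [PySem.Dict.items_insert, if_pos (hck' w), PySem.Dict.items_insert, if_pos h',
        PySem.Dict.items_insert, if_pos (hck.trans h'), PySem.Dict.items_insert, if_pos hc]
    rw [List.map_map, List.map_map]
    apply List.map_congr_left
    intro p _
    by_cases h1 : p.1 = k' <;> by_cases h2 : p.1 = k <;>
      simp_all [Function.comp, beq_iff_eq, Ne.symm hne]
  · have h'' : C.contains k' = false := by simpa using h'
    rw [PySem.Dict.items_insert, if_pos (hck' w), PySem.Dict.items_insert, if_neg (by simp [h'']),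
        PySem.Dict.items_insert, if_neg (by simp [hck, h'']), PySem.Dict.items_insert, if_pos hc]
    rw [List.map_append]
    congr 1
    · simp [beq_iff_eq, Ne.symm hne]
      exact hne

theorem pvRun_extract : ∀ (t : List ((String × String) × Int))
    (C : PySem.Dict (String × String) Int) (k : String × String),
    C.contains k = true → C.keys.Nodup →
    pvRun C t = pvRun (C.insert k (C.getD k 0 + pvKsum k t)) (t.filter (fun p => p.1 != k)) := by
  intro t
  induction t with
  | nil =>
    intro C k hc hnd
    simp only [pvKsum, List.filter_nil, List.map_nil, List.sum_nil, add_zero]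
    exact (pv_insert_self_of_contains C k hc hnd).symm
  | cons p t ih =>
    intro C k hc hnd
    by_cases hpk : p.1 = k
    · have hfilt : ((p :: t).filter (fun p => p.1 != k)) = t.filter (fun p => p.1 != k) := by
        simp [List.filter_cons, hpk]
      have hksum : pvKsum k (p :: t) = p.2 + pvKsum k t := by
        simp [pvKsum, List.filter_cons, hpk]
      have h1 : pvRun C (p :: t) = pvRun (C.insert k (C.getD k 0 + p.2)) t := by
        simp [pvRun, hpk]
      rw [h1, hfilt, hksum]
      have hc1 : (C.insert k (C.getD k 0 + p.2)).contains k = true :=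
        PySem.Dict.contains_insert_self C k _
      have hnd1 : (C.insert k (C.getD k 0 + p.2)).keys.Nodup :=
        PySem.Dict.nodup_keys_insert C k _ hnd
      rw [ih _ k hc1 hnd1, PySem.Dict.getD_insert_self, PySem.Dict.insert_insert_self]
      ring_nf
    · have hfilt : ((p :: t).filter (fun p => p.1 != k))
          = p :: t.filter (fun p => p.1 != k) := by
        simp [List.filter_cons, hpk]
      have hksum : pvKsum k (p :: t) = pvKsum k t := by
        simp [pvKsum, List.filter_cons, hpk]
      have h1 : pvRun C (p :: t) = pvRun (C.insert p.1 (C.getD p.1 0 + p.2)) t := by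
        simp [pvRun]
      rw [h1, hfilt, hksum]
      have hc2 : (C.insert p.1 (C.getD p.1 0 + p.2)).contains k = true := by
        rw [PySem.Dict.contains_insert]; simp [hc]
      have hnd2 : (C.insert p.1 (C.getD p.1 0 + p.2)).keys.Nodup :=
        PySem.Dict.nodup_keys_insert C p.1 _ hnd
      rw [ih _ k hc2 hnd2]
      have hgd : (C.insert p.1 (C.getD p.1 0 + p.2)).getD k 0 = C.getD k 0 :=
        PySem.Dict.getD_insert_of_ne C _ _ (fun h => hpk h.symm)
      rw [hgd, pv_insert_comm_of_contains C k p.1 _ _ hc hpk]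
      have hstep : pvRun (C.insert k (C.getD k 0 + pvKsum k t))
            (p :: t.filter (fun p => p.1 != k))
          = pvRun (((C.insert k (C.getD k 0 + pvKsum k t)).insert p.1
              ((C.insert k (C.getD k 0 + pvKsum k t)).getD p.1 0 + p.2)))
            (t.filter (fun p => p.1 != k)) := by
        simp [pvRun]
      rw [hstep, PySem.Dict.getD_insert_of_ne C _ _ hpk]

theorem pv_ofList_filter {α : Type} [BEq α] [LawfulBEq α] (p : α → Bool) :
    ∀ (l : List α), PySem.Set.ofList (l.filter p) = (PySem.Set.ofList l).filter p := by
  intro l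
  induction l with
  | nil => rfl
  | cons a l ih =>
    by_cases hpa : p a
    · rw [List.filter_cons_of_pos hpa, PySem.Set.ofList_cons, PySem.Set.ofList_cons, ih,
          List.filter_cons_of_pos hpa]
      simp only [PySem.Set.discard]
      rw [List.filter_comm]
    · rw [List.filter_cons_of_neg hpa, PySem.Set.ofList_cons, ih,
          List.filter_cons_of_neg hpa]
      simp only [PySem.Set.discard]
      rw [List.filter_comm]
      symm
      rw [List.filter_eq_self]
      intro x hx
      have hx' := List.of_mem_filter hx
      simp only [Bool.not_eq_true', beq_eq_false_iff_ne]
      intro hxa; rw [hxa] at hx'; exact hpa (by simpa using hx')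

theorem pv_ofList_map_inj {α β : Type} [BEq α] [LawfulBEq α] [BEq β] [LawfulBEq β]
    (f : α → β) (hf : Function.Injective f) :
    ∀ (l : List α), PySem.Set.ofList (l.map f) = (PySem.Set.ofList l).map f := by
  intro l
  induction l with
  | nil => rfl
  | cons a l ih =>
    rw [List.map_cons, PySem.Set.ofList_cons, PySem.Set.ofList_cons, ih, List.map_cons]
    simp only [PySem.Set.discard]
    congr 1
    rw [List.filter_map]
    congr 1
    apply List.filter_congr
    intro y _
    by_cases h : y = a
    · simp [h]
    · simp [h, hf.ne h]

theorem pvKsum_cons_eq (k : String × String) (m : Int) (t : List ((String × String) × Int)) :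
    pvKsum k ((k, m) :: t) = m + pvKsum k t := by
  simp [pvKsum, List.filter_cons]

theorem pvKsum_cons_ne (x k : String × String) (m : Int) (t : List ((String × String) × Int))
    (h : x ≠ k) : pvKsum x ((k, m) :: t) = pvKsum x t := by
  have : (k == x) = false := by simpa using fun hy => h hy.symm
  simp [pvKsum, List.filter_cons, this]

theorem pvKsum_filter (x k : String × String) (t : List ((String × String) × Int))
    (h : x ≠ k) : pvKsum x (t.filter (fun p => p.1 != k)) = pvKsum x t := by
  unfold pvKsum
  rw [List.filter_filter]
  congr 1
  congr 1
  apply List.filter_congr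
  intro p _
  by_cases hp : p.1 = x
  · simp [hp, h]
  · simp [hp]

theorem pvNormal_cons (k : String × String) (m : Int) (t : List ((String × String) × Int)) :
    pvNormal ((k, m) :: t)
      = (k, m + pvKsum k t) :: pvNormal (t.filter (fun p => p.1 != k)) := by
  unfold pvNormal
  rw [List.map_cons, PySem.Set.ofList_cons, List.map_cons, pvKsum_cons_eq]
  congr 1
  simp only [PySem.Set.discard]
  have hmapfst : (t.filter (fun p => p.1 != k)).map Prod.fst
      = (t.map Prod.fst).filter (fun x => x != k) := by
    rw [List.filter_map]; rfl
  rw [hmapfst, pv_ofList_filter]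
  have hsame : ∀ pred : (String × String) → Bool, pred = (fun y => !(y == k)) →
      ((PySem.Set.ofList (t.map Prod.fst)).filter pred).map (fun x => (x, pvKsum x ((k, m) :: t)))
      = ((PySem.Set.ofList (t.map Prod.fst)).filter pred).map
          (fun x => (x, pvKsum x (t.filter (fun p => p.1 != k)))) := by
    intro pred hpred
    apply List.map_congr_left
    intro x hx
    have hxk : x ≠ k := by
      have := List.of_mem_filter hx
      rw [hpred] at this
      simpa using this
    rw [pvKsum_cons_ne _ _ _ _ hxk, pvKsum_filter _ _ _ hxk]
  exact hsame (fun y => y != k) (by funext y; rfl)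

theorem pvRun_normal : ∀ (n : Nat) (t : List ((String × String) × Int)), t.length ≤ n →
    ∀ (C : PySem.Dict (String × String) Int), C.keys.Nodup →
    pvRun C t = pvRun C (pvNormal t) := by
  intro n
  induction n with
  | zero =>
    intro t ht C _
    rw [List.eq_nil_of_length_eq_zero (Nat.le_zero.mp ht)]
    rfl
  | succ n ih =>
    intro t ht C hnd
    match t with
    | [] => rfl
    | (k, m) :: t' =>
      have h1 : pvRun C ((k, m) :: t') = pvRun (C.insert k (C.getD k 0 + m)) t' := by
        simp [pvRun]
      have hc1 : (C.insert k (C.getD k 0 + m)).contains k = true :=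
        PySem.Dict.contains_insert_self C k _
      have hnd1 : (C.insert k (C.getD k 0 + m)).keys.Nodup :=
        PySem.Dict.nodup_keys_insert C k _ hnd
      rw [h1, pvRun_extract t' _ k hc1 hnd1, PySem.Dict.getD_insert_self,
          PySem.Dict.insert_insert_self]
      have hlen : (t'.filter (fun p => p.1 != k)).length ≤ n := by
        have := List.length_filter_le (fun p => p.1 != k) t'
        simp at ht
        omega
      have hnd2 : (C.insert k (C.getD k 0 + m + pvKsum k t')).keys.Nodup :=
        PySem.Dict.nodup_keys_insert C k _ hnd
      rw [ih _ hlen _ hnd2, pvNormal_cons]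
      have h2 : pvRun C ((k, m + pvKsum k t') :: pvNormal (t'.filter (fun p => p.1 != k)))
          = pvRun (C.insert k (C.getD k 0 + (m + pvKsum k t')))
              (pvNormal (t'.filter (fun p => p.1 != k))) := by
        simp [pvRun]
      rw [h2, add_assoc]

theorem pv_count_P : ∀ (u w : List String) (x y : String), x ≠ y →
    (pvP u w).count (x, y) = u.count x * w.count y := by
  intro u w x y hxy
  induction u with
  | nil => simp [pvP]
  | cons a u' ih =>
    rw [pvP, List.flatMap_cons, List.count_append, ← pvP, ih]
    by_cases hax : a = x
    · subst hax
      have hrow : ((w.filter (fun b => b != a)).map (fun b => (a, b))).count (a, y)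
          = (w.filter (fun b => b != a)).count y :=
        List.count_map_of_injective _ _ (fun b₁ b₂ h => by simpa using h) y
      have hfy : (w.filter (fun b => b != a)).count y = w.count y :=
        List.count_filter (by simpa using fun h => hxy h.symm)
      rw [hrow, hfy, List.count_cons_self]
      ring
    · have hrow : ((w.filter (fun b => b != a)).map (fun b => (a, b))).count (x, y) = 0 := by
        rw [List.count_eq_zero]
        intro hmem
        obtain ⟨b, _, hb⟩ := List.mem_map.mp hmem
        exact hax (congrArg Prod.fst hb)
      rw [hrow]
      have hxa : (a == x) = false := by simpa using hax
      simp [List.count_cons, hxa]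

theorem pv_rowD (w : List String) (a : String) :
    PySem.Set.ofList ((w.filter (fun b => b != a)).map (fun b => (a, b)))
      = (((PySem.Set.ofList w).filter (fun b => b != a)).map (fun b => (a, b))) := by
  rw [pv_ofList_map_inj _ (fun b₁ b₂ h => by simpa using h), pv_ofList_filter]

theorem pv_filter_flatMap {α β : Type} (g : α → List β) (q : β → Bool) :
    ∀ (l : List α), (l.flatMap g).filter q = l.flatMap (fun x => (g x).filter q) := by
  intro l
  induction l with
  | nil => rfl
  | cons a l ih => rw [List.flatMap_cons, List.filter_append, ih, List.flatMap_cons]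

theorem pv_flatMap_congr_mem' {α β : Type} (l : List α) (f g : α → List β)
    (h : ∀ x ∈ l, f x = g x) : l.flatMap f = l.flatMap g := by
  induction l with
  | nil => rfl
  | cons a l ih =>
    rw [List.flatMap_cons, List.flatMap_cons, h a List.mem_cons_self,
        ih (fun x hx => h x (List.mem_cons_of_mem a hx))]

theorem pv_flatMap_if_filter {α β : Type} [BEq α] [LawfulBEq α] [DecidableEq α]
    (a : α) (g : α → List β) :
    ∀ (l : List α), (l.flatMap (fun x => if x = a then [] else g x))
      = (l.filter (fun y => !(y == a))).flatMap g := by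
  intro l
  induction l with
  | nil => rfl
  | cons b l ih =>
    rw [List.flatMap_cons, List.filter_cons]
    by_cases h : b = a
    · simp [h, ih]
    · simp [h, ih]

theorem pv_ofList_P : ∀ (u w : List String),
    PySem.Set.ofList (pvP u w) = pvP (PySem.Set.ofList u) (PySem.Set.ofList w) := by
  intro u w
  induction u with
  | nil => rfl
  | cons a u' ih =>
    rw [pvP, List.flatMap_cons, ← pvP, PySem.Set.ofList_append, PySem.Set.update_eq_append_filter,
        ih, pv_rowD]
    rw [PySem.Set.ofList_cons]
    simp only [PySem.Set.discard]
    conv_rhs => rw [pvP, List.flatMap_cons]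
    congr 1
    rw [pvP, pv_filter_flatMap]
    have hcongr : ∀ x ∈ PySem.Set.ofList u',
        ((((PySem.Set.ofList w).filter (fun b => b != x)).map (fun b => (x, b))).filter
          (fun y => !(PySem.Set.contains
            (((PySem.Set.ofList w).filter (fun b => b != a)).map (fun b => (a, b))) y)))
        = if x = a then []
          else ((PySem.Set.ofList w).filter (fun b => b != x)).map (fun b => (x, b)) := by
      intro x _
      by_cases hxa : x = a
      · subst hxa
        rw [if_pos rfl, List.filter_eq_nil_iff]
        intro pr hpr
        have hc : PySem.Set.contains _ pr = true := (PySem.Set.contains_iff _ _).mpr hpr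
        simp only [hc, Bool.not_true]
        simp
      · rw [if_neg hxa, List.filter_eq_self]
        intro pr hpr
        obtain ⟨b, _, hb⟩ := List.mem_map.mp hpr
        have hnot : pr ∉ ((PySem.Set.ofList w).filter (fun b => b != a)).map (fun b => (a, b)) := by
          intro hmem
          obtain ⟨b', _, hb'⟩ := List.mem_map.mp hmem
          apply hxa
          have h1 : pr.1 = x := by rw [← hb]
          have h2 : pr.1 = a := by rw [← hb']
          rw [← h1, h2]
        simp only [Bool.not_eq_true']
        rw [← Bool.not_eq_true]
        intro hcont
        exact hnot ((PySem.Set.contains_iff _ _).mp hcont)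
    calc (PySem.Set.ofList u').flatMap (fun x =>
            ((((PySem.Set.ofList w).filter (fun b => b != x)).map (fun b => (x, b))).filter
              (fun y => !(PySem.Set.contains
                (((PySem.Set.ofList w).filter (fun b => b != a)).map (fun b => (a, b))) y))))
        = (PySem.Set.ofList u').flatMap (fun x =>
            if x = a then []
            else ((PySem.Set.ofList w).filter (fun b => b != x)).map (fun b => (x, b))) := by
          exact pv_flatMap_congr_mem' _ _ _ hcongr
      _ = ((PySem.Set.ofList u').filter (fun y => !(y == a))).flatMap
            (fun x => ((PySem.Set.ofList w).filter (fun b => b != x)).map (fun b => (x, b))) :=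
          pv_flatMap_if_filter _ _ _


theorem pvKsum_ones : ∀ (l : List (String × String)) (k : String × String),
    pvKsum k (l.map (fun k => (k, (1 : Int)))) = (l.count k : Int) := by
  intro l k
  induction l with
  | nil => simp [pvKsum]
  | cons a l ih =>
    by_cases h : a = k
    · subst h
      simp [pvKsum, List.filter_cons, List.count_cons] at *
      omega
    · have h' : (a == k) = false := by simpa using h
      simp [pvKsum, List.filter_cons, List.count_cons, h'] at *
      simpa [h] using ih

theorem pvNormal_AL (v : List String) : pvNormal (pvAL v) = pvBL v := by
  unfold pvNormal pvBL
  have hfst : (pvAL v).map Prod.fst = pvP v v := by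
    simp [pvAL, List.map_map, Function.comp_def]
  rw [hfst, pv_ofList_P]
  apply List.map_congr_left
  intro k hk
  obtain ⟨x, _, hrow⟩ := List.mem_flatMap.mp hk
  obtain ⟨b, hbf, hb⟩ := List.mem_map.mp hrow
  have hbx : b ≠ x := by simpa using List.of_mem_filter hbf
  obtain ⟨k1, k2⟩ := k
  injection hb with h1 h2
  subst h1; subst h2
  simp only [Prod.mk.injEq, true_and]
  rw [pvAL, pvKsum_ones, pv_count_P v v x b (fun h => hbx h.symm)]
  push_cast
  rfl

-- B's helper produces exactly the normalised update list pvBL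
theorem pv_edgeUpdates_eq (v : List String) : pvEdgeUpdates v = pvBL v := by
  unfold pvEdgeUpdates
  rw [PySem.Dict.foldl_insert_getD_add_one_eq_counter]
  dsimp only
  rw [PySem.Dict.items_counter]
  unfold pvBL pvP
  rw [List.map_flatMap, List.flatMap_map]
  apply pv_flatMap_congr_mem'
  intro a _
  rw [List.filter_map, List.map_map, List.map_map]
  have hpred : ((fun yp : String × Int => a != yp.1) ∘ (fun k : String => (k, (v.count k : Int))))
      = (fun b => b != a) := by
    funext b
    show (a != b) = (b != a)
    by_cases h : b = a
    · simp [h]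
    · have h1 : (a != b) = true := bne_iff_ne.mpr (fun hy => h hy.symm)
      have h2 : (b != a) = true := bne_iff_ne.mpr h
      rw [h1, h2]
  rw [hpred]
  rfl

theorem pv_step_eq (v : List String) (C : PySem.Dict (String × String) Int) (h : C.keys.Nodup) :
    pvRun C (pvAL v) = pvRun C (pvBL v) := by
  rw [pvRun_normal (pvAL v).length (pvAL v) le_rfl C h, pvNormal_AL]

theorem pv_main : ∀ (E : List (String × List String)) (C : PySem.Dict (String × String) Int),
    C.keys.Nodup →
    E.foldl (fun C p =>
      p.2.foldl (fun C vi =>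
        p.2.foldl (fun C vj =>
          if vi ≠ vj then C.insert (vi, vj) (C.getD (vi, vj) 0 + 1) else C) C) C) C
    = pvRun C (E.flatMap (fun vs => pvEdgeUpdates vs.2)) := by
  intro E
  induction E with
  | nil => intro C _; rfl
  | cons e E ih =>
    intro C hnd
    rw [List.foldl_cons, List.flatMap_cons, pvRun_append, pv_stepA_eq_run,
        pv_edgeUpdates_eq, pv_step_eq e.2 C hnd]
    exact ih _ (pvRun_nodup _ _ hnd)

-- ===== VERDICT (by name: the statement is the Claim_ definition above) =====
theorem compute_cartesian_product_spec : Claim_equal_compute_cartesian_product := by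
  intro E _
  unfold Spec_compute_cartesian_product compute_cartesian_product compute_cartesian_product_alt
  rw [pv_main E PySem.Dict.empty (by simp [PySem.Dict.keys_empty])]
  rfl
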